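-- pv_equiv track=rewrite | github.com/StepanBlaha/advent_of_code_2025 | 6.py | build_number_from_column
-- ===== SOURCE A (Python) =====
-- def build_number_from_column(grid, col: int) -> int:
--     """
--     For a given column index, build one number from the digits
--     in that column (top to bottom, ignoring spaces).
--     The bottom row is the operator row, so we skip it.
--     """
--     digits = []
--     # all rows except the last (which holds operators)
--     for r in range(len(grid) - 1):
--         ch = grid[r][col]
--         if ch.isdigit():
--             digits.append(ch)
--
--     if not digits:
--         # if somehow no digits, treat as 0 (or raise an error if you prefer)
--         return 0
--
--     return int("".join(digits))
-- ===== SOURCE B (Python) =====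
-- def build_number_from_column(grid, col: int) -> int:
--     # Running integer accumulator over the rows grid[:-1]; no char list,
--     # no string join, no int() parse.
--     num = 0
--     for row in grid[:-1]:
--         ch = row[col]
--         if ch.isdigit():
--             num = num * 10 + (ord(ch) - ord('0'))
--     return num
-- ===== Notes on version B (the rewrite author's own statement) =====
-- stated objective: simpler
-- what changed: Replaces the collect-digit-chars / ''.join / int(...) pipeline driven by row indices with a single integer accumulator num = num*10 + digit folded directly over the rows grid[:-1]; no list or string is ever built.
import Mathlib
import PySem

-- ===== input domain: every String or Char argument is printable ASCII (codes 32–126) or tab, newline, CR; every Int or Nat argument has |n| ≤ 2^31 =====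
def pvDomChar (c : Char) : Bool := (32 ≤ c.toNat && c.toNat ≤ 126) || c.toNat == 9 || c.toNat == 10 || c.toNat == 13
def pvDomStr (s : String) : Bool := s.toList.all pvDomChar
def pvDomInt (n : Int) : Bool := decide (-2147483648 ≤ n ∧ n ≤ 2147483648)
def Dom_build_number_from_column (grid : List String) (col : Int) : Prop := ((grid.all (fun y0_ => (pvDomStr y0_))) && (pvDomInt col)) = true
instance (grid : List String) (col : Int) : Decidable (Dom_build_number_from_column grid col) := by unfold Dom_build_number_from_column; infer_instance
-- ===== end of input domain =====

-- B replaces A's collect-digits / join / int() pipeline by one integer accumulator over grid[:-1] (simpler; return value only, no mutation).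

-- ===== PORT A =====
-- int("".join(digits)): hand port of int() on its only reachable inputs — `digits` is by
-- construction a nonempty list of chars that passed isdigit (ASCII under Dom, so '0'..'9'),
-- where int() is exactly the schoolbook base-10 value of the digit sequence.
def pyIntOfDigitChars (ds : List Char) : Int :=
  ds.foldl (fun a c => a * 10 + ((c.toNat : Int) - 48)) 0

def build_number_from_column (grid : List String) (col : Int) : Int :=
  -- digits = []; for r in range(len(grid) - 1): ch = grid[r][col]; if ch.isdigit(): digits.append(ch)
  let digits := (PySem.List.pyRange 0 ((grid.length : Int) - 1)).foldl
    (fun ds r =>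
      -- grid[r][col]: Pre_ guarantees the column index is in range for every row but the last
      let ch := PySem.List.pyGetD (PySem.List.pyGetD grid r "").toList col ' '
      if PySem.Chars.isdigit ch then ds ++ [ch] else ds) ([] : List Char)
  if digits = [] then 0
  else pyIntOfDigitChars digits

-- ===== PORT B =====
def build_number_from_column_alt (grid : List String) (col : Int) : Int :=
  -- num = 0; for row in grid[:-1]: ch = row[col]; if ch.isdigit(): num = num*10 + (ord(ch) - ord('0'))
  (PySem.List.slice grid none (some (-1))).foldl
    (fun num row =>
      let ch := PySem.List.pyGetD row.toList col ' '
      if PySem.Chars.isdigit ch then num * 10 + ((ch.toNat : Int) - 48) else num) 0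

-- ===== PRECONDITION & SPEC =====
-- Pre_ excludes exactly the inputs on which Python A raises IndexError: a column index out of
-- range (Python negative indexing included) for some row other than the last.
def Pre_build_number_from_column (grid : List String) (col : Int) : Prop :=
  ∀ row ∈ grid.dropLast, PySem.Raise.InRange row.toList.length col
instance (grid : List String) (col : Int) : Decidable (Pre_build_number_from_column grid col) := by
  unfold Pre_build_number_from_column; infer_instance

def pvWitness_build_number_from_column : List String × Int := (["12", "34", "+*"], 0)

def Spec_build_number_from_column (grid : List String) (col : Int) (out : Int) : Prop := out = build_number_from_column_alt grid col
instance (grid : List String) (col : Int) (out : Int) : Decidable (Spec_build_number_from_column grid col out) := by unfold Spec_build_number_from_column; infer_instance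

-- ===== CLAIM (what is proved, stated in full; the proofs are below) =====
def Claim_equal_build_number_from_column : Prop := ∀ (grid : List String) (col : Int), Dom_build_number_from_column grid col → Pre_build_number_from_column grid col → Spec_build_number_from_column grid col (build_number_from_column grid col)

-- ===== LEMMAS AND PROOFS =====

-- grid[:-1] is dropLast
theorem slice_none_neg_one {α : Type} (xs : List α) :
    PySem.List.slice xs none (some (-1)) = xs.dropLast := by
  unfold PySem.List.slice
  simp
  exact List.dropLast_eq_take.symm

-- the `for r in range(len(grid) - 1): … grid[r] …` loop is a fold over grid.dropLast
theorem foldl_range_dropLast {β : Type} (grid : List String) (g : β → String → β) (init : β) :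
    (PySem.List.pyRange 0 ((grid.length : Int) - 1)).foldl
      (fun acc r => g acc (PySem.List.pyGetD grid r "")) init
    = grid.dropLast.foldl g init := by
  rcases grid with _ | ⟨x, xs⟩
  · simp
  · have hlen : ((x :: xs).length : Int) - 1 = (((x :: xs).dropLast).length : Int) := by
      simp [List.length_dropLast]
    rw [hlen, ← PySem.List.foldl_pyRange_zero_pyGetD' ((x :: xs).dropLast) "" g init]
    apply PySem.List.foldl_congr_mem
    intro acc r hr
    obtain ⟨h0, h1⟩ := PySem.List.mem_pyRange_one.mp hr
    have h1' : r < ((x :: xs).length : Int) := by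
      simp at h1 ⊢; omega
    rw [PySem.List.pyGetD_eq_getElem _ _ h0 h1', PySem.List.pyGetD_eq_getElem _ _ h0 h1]
    congr 1
    exact (List.getElem_dropLast _).symm

-- B's accumulator fold over a row list equals the base-10 value of A's collected digit chars
theorem num_fold_eq_val (rows : List String) (col : Int) (ds : List Char) :
    rows.foldl
      (fun num row =>
        if PySem.Chars.isdigit (PySem.List.pyGetD row.toList col ' ')
        then num * 10 + (((PySem.List.pyGetD row.toList col ' ').toNat : Int) - 48) else num)
      (pyIntOfDigitChars ds)
    = pyIntOfDigitChars
        (rows.foldl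
          (fun acc row =>
            if PySem.Chars.isdigit (PySem.List.pyGetD row.toList col ' ')
            then acc ++ [PySem.List.pyGetD row.toList col ' '] else acc) ds) := by
  induction rows generalizing ds with
  | nil => rfl
  | cons row rest ih =>
    simp only [List.foldl_cons]
    by_cases h : PySem.Chars.isdigit (PySem.List.pyGetD row.toList col ' ') = true
    · simp only [h, if_true]
      rw [show pyIntOfDigitChars ds * 10 + (((PySem.List.pyGetD row.toList col ' ').toNat : Int) - 48)
            = pyIntOfDigitChars (ds ++ [PySem.List.pyGetD row.toList col ' ']) from by
        simp [pyIntOfDigitChars, List.foldl_append]]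
      exact ih _
    · simp only [h, Bool.false_eq_true, if_false]
      exact ih _

-- ===== VERDICT (by name: the statement is the Claim_ definition above) =====
theorem build_number_from_column_spec : Claim_equal_build_number_from_column := by
  intro grid col _hdom _hpre
  unfold Spec_build_number_from_column
  simp only [build_number_from_column, build_number_from_column_alt]
  rw [slice_none_neg_one,
      foldl_range_dropLast grid
        (fun ds row =>
          if PySem.Chars.isdigit (PySem.List.pyGetD row.toList col ' ')
          then ds ++ [PySem.List.pyGetD row.toList col ' '] else ds) ([] : List Char)]
  conv_rhs => rw [show (0 : Int) = pyIntOfDigitChars [] from rfl]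
  rw [num_fold_eq_val]
  split
  · next h => rw [h]; rfl
  · rfl
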